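-- pv_equiv track=rewrite | github.com/hookSSi/RobotChef | robotchef_flask_server/test.py | merge_batchu_set
-- ===== SOURCE A (Python) =====
-- def check_valid(src, dst):
--     delta_x = src[0] - dst[0]
--     delta_y = src[1] - dst[1]
--     distance = delta_x * delta_x + delta_y * delta_y
--
--     return distance <= 1
--
-- def get_valid_batchu_set(pos, pos_set_list):
--     valid_set_list = list()
--     not_valid_set_list = list()
--     for batchu_set in pos_set_list:
--         valid = False
--         for batchu_pos in batchu_set:
--             if check_valid(pos, batchu_pos):
--                 valid = True
--                 break
--         if valid:
--             valid_set_list.append(batchu_set)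
--         else:
--             not_valid_set_list.append(batchu_set)
--
--     return valid_set_list, not_valid_set_list
--
-- def merge_batchu_set(pos, set_list):
--     valid_batchu_set_list, not_valid_set_list = get_valid_batchu_set(pos, set_list)
--
--     merged_set = list()
--     merged_set.append(pos)
--     for batchu_set in valid_batchu_set_list:
--         merged_set = merged_set + batchu_set
--
--     not_valid_set_list.append(merged_set)
--     return not_valid_set_list
-- ===== SOURCE B (Python) =====
-- def merge_batchu_set(pos, set_list):
--     if not set_list:
--         return [[pos]]
--     if len(set_list) == 1:
--         s = set_list[0]
--         if any((pos[0] - p[0]) ** 2 + (pos[1] - p[1]) ** 2 <= 1 for p in s):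
--             return [[pos] + s]
--         return [s, [pos]]
--     mid = len(set_list) // 2
--     left = merge_batchu_set(pos, set_list[:mid])
--     right = merge_batchu_set(pos, set_list[mid:])
--     # each half ends with its merged group ([pos, ...]); splice the two merged groups
--     return left[:-1] + right[:-1] + [left[-1] + right[-1][1:]]
-- ===== Notes on version B (the rewrite author's own statement) =====
-- stated objective: alternative
-- what changed: Divide-and-conquer recursion: solve each half of set_list, then combine by concatenating the non-adjacent groups and splicing the two halves' merged tail groups into one; replaces A's partition helper plus second merge loop.
import Mathlib
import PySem

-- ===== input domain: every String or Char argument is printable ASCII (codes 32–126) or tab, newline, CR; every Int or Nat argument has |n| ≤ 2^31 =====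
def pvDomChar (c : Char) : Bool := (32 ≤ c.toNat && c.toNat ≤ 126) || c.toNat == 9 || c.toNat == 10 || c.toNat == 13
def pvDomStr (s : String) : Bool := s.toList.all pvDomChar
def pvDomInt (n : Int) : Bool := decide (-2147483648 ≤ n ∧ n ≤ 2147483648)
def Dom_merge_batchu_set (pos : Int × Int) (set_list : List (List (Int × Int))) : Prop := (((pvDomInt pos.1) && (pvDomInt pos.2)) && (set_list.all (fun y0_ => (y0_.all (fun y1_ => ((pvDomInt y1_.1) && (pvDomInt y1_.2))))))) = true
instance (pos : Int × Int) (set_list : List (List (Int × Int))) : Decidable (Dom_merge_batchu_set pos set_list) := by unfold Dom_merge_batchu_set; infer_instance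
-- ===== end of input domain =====

-- B replaces A's partition helper + second merge loop by a divide-and-conquer recursion on halves (alternative algorithm, same result).

-- ===== PORT A =====
def check_valid (src dst : Int × Int) : Bool :=
  let delta_x := src.1 - dst.1
  let delta_y := src.2 - dst.2
  let distance := delta_x * delta_x + delta_y * delta_y
  decide (distance ≤ 1)

def get_valid_batchu_set (pos : Int × Int) (pos_set_list : List (List (Int × Int))) :
    List (List (Int × Int)) × List (List (Int × Int)) :=
  pos_set_list.foldl
    (fun (acc : List (List (Int × Int)) × List (List (Int × Int))) batchu_set =>
      -- A's inner flag-and-break loop over batchu_set is this 'any'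
      if batchu_set.any (fun batchu_pos => check_valid pos batchu_pos) then
        (acc.1 ++ [batchu_set], acc.2)
      else
        (acc.1, acc.2 ++ [batchu_set]))
    ([], [])

def merge_batchu_set (pos : Int × Int) (set_list : List (List (Int × Int))) : List (List (Int × Int)) :=
  let vp := get_valid_batchu_set pos set_list
  let merged_set := vp.1.foldl (fun m s => m ++ s) [pos]
  vp.2 ++ [merged_set]

-- ===== PORT B =====
-- fuel = set_list.length is only a structural-recursion guard (each half is strictly shorter), not an algorithm change
def mergeGo (pos : Int × Int) : Nat → List (List (Int × Int)) → List (List (Int × Int))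
  | 0, _ => [[pos]]          -- unreachable: fuel starts at the length and never drops below it
  | fuel + 1, set_list =>
    if set_list = [] then [[pos]]
    else if set_list.length = 1 then
      let s := set_list.headD []          -- set_list[0]; exact: set_list ≠ []
      if s.any (fun p => (pos.1 - p.1) ^ 2 + (pos.2 - p.2) ^ 2 ≤ 1) then
        [[pos] ++ s]
      else [s, [pos]]
    else
      let mid := set_list.length / 2      -- len(set_list) // 2 (nonnegative, so Nat division is exact)
      let left := mergeGo pos fuel (set_list.take mid)    -- set_list[:mid]
      let right := mergeGo pos fuel (set_list.drop mid)   -- set_list[mid:]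
      -- left[:-1] + right[:-1] + [left[-1] + right[-1][1:]]; exact: both results are nonempty
      left.dropLast ++ right.dropLast ++ [left.getLastD [] ++ (right.getLastD []).tail]

def merge_batchu_set_alt (pos : Int × Int) (set_list : List (List (Int × Int))) : List (List (Int × Int)) :=
  mergeGo pos set_list.length set_list

-- ===== PRECONDITION & SPEC =====
def Spec_merge_batchu_set (pos : Int × Int) (set_list : List (List (Int × Int))) (out : List (List (Int × Int))) : Prop := out = merge_batchu_set_alt pos set_list
instance (pos : Int × Int) (set_list : List (List (Int × Int))) (out : List (List (Int × Int))) : Decidable (Spec_merge_batchu_set pos set_list out) := by unfold Spec_merge_batchu_set; infer_instance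

-- ===== CLAIM =====
def Claim_equal_merge_batchu_set : Prop := ∀ (pos : Int × Int) (set_list : List (List (Int × Int))), Dom_merge_batchu_set pos set_list → Spec_merge_batchu_set pos set_list (merge_batchu_set pos set_list)

-- ===== LEMMAS AND PROOFS =====
-- B's adjacency test equals A's check_valid
theorem adj_eq_check (pos p : Int × Int) :
    (decide ((pos.1 - p.1) ^ 2 + (pos.2 - p.2) ^ 2 ≤ 1)) = check_valid pos p := by
  simp [check_valid, sq]

-- A's partition fold, with general accumulator, is a pair of filters
theorem getA_char (pos : Int × Int) (l : List (List (Int × Int)))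
    (v nv : List (List (Int × Int))) :
    l.foldl
      (fun (acc : List (List (Int × Int)) × List (List (Int × Int))) batchu_set =>
        if batchu_set.any (fun batchu_pos => check_valid pos batchu_pos) then
          (acc.1 ++ [batchu_set], acc.2)
        else
          (acc.1, acc.2 ++ [batchu_set]))
      (v, nv)
    = (v ++ l.filter (fun bs => bs.any (fun p => check_valid pos p)),
       nv ++ l.filter (fun bs => !bs.any (fun p => check_valid pos p))) := by
  induction l generalizing v nv with
  | nil => simp
  | cons bs t ih =>
    by_cases h : bs.any (fun p => check_valid pos p) = true <;>
      simp [List.filter, h, ih]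

-- A's second loop flattens
theorem foldl_append_flatten (l : List (List (Int × Int))) (m : List (Int × Int)) :
    l.foldl (fun m s => m ++ s) m = m ++ l.flatten := by
  induction l generalizing m with
  | nil => simp
  | cons s t ih => simp [ih]

-- characterization of B: non-adjacent sets in order, then pos followed by the adjacent sets flattened
theorem goChar (pos : Int × Int) (fuel : Nat) (l : List (List (Int × Int)))
    (h : l.length ≤ fuel) :
    mergeGo pos fuel l
    = l.filter (fun bs => !bs.any (fun p => check_valid pos p))
      ++ [pos :: (l.filter (fun bs => bs.any (fun p => check_valid pos p))).flatten] := by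
  induction fuel generalizing l with
  | zero =>
    have : l = [] := List.length_eq_zero_iff.mp (Nat.le_zero.mp h)
    subst this; simp [mergeGo]
  | succ fuel ih =>
    rw [mergeGo]
    by_cases h0 : l = []
    · subst h0; simp
    · simp only [if_neg h0]
      by_cases h1 : l.length = 1
      · simp only [if_pos h1, adj_eq_check]
        rcases l with _ | ⟨a, t⟩
        · exact absurd rfl h0
        · have ht : t = [] := by simpa using h1
          subst ht
          by_cases hadj : a.any (fun p => check_valid pos p) = true <;>
            simp [List.filter, hadj]
      · simp only [if_neg h1]
        have h2 : 2 ≤ l.length := by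
          have : l.length ≠ 0 := by simpa [List.length_eq_zero_iff] using h0
          omega
        set mid := l.length / 2 with hmid
        have htl : (l.take mid).length ≤ fuel := by
          simp only [List.length_take]; omega
        have hdl : (l.drop mid).length ≤ fuel := by
          simp only [List.length_drop]; omega
        rw [ih _ htl, ih _ hdl]
        simp only [List.dropLast_concat, List.getLastD_concat, List.tail_cons]
        have hf : (l.take mid).filter (fun bs => !bs.any (fun p => check_valid pos p))
            ++ (l.drop mid).filter (fun bs => !bs.any (fun p => check_valid pos p))
            = l.filter (fun bs => !bs.any (fun p => check_valid pos p)) := by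
          rw [← List.filter_append, List.take_append_drop]
        have hg : ((l.take mid).filter (fun bs => bs.any (fun p => check_valid pos p))).flatten
            ++ ((l.drop mid).filter (fun bs => bs.any (fun p => check_valid pos p))).flatten
            = (l.filter (fun bs => bs.any (fun p => check_valid pos p))).flatten := by
          rw [← List.flatten_append, ← List.filter_append, List.take_append_drop]
        rw [← hf, ← hg]
        simp [List.append_assoc]

theorem altChar (pos : Int × Int) (l : List (List (Int × Int))) :
    merge_batchu_set_alt pos l
    = l.filter (fun bs => !bs.any (fun p => check_valid pos p))
      ++ [pos :: (l.filter (fun bs => bs.any (fun p => check_valid pos p))).flatten] :=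
  goChar pos l.length l le_rfl

-- ===== VERDICT =====
theorem merge_batchu_set_spec : Claim_equal_merge_batchu_set := by
  intro pos set_list _
  unfold Spec_merge_batchu_set merge_batchu_set get_valid_batchu_set
  rw [altChar]
  simp only [getA_char, foldl_append_flatten, List.nil_append, List.singleton_append]
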